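-- pv_equiv track=rewrite | github.com/MaxSchmitz/cosmos-chessbot | scripts/generate_value_hybrid_dataset.py | fen_to_board_state
-- ===== SOURCE A (Python) =====
-- def fen_to_board_state(fen: str) -> dict:
--     """
--     Convert FEN to board state (square -> piece type).
--
--     Args:
--         fen: FEN string
--
--     Returns:
--         Dict mapping square names to piece types (P, p, N, etc.)
--     """
--     board_part = fen.split()[0]
--     ranks = board_part.split('/')
--
--     state = {}
--
--     for rank_idx, rank in enumerate(ranks):
--         file_idx = 0
--
--         for char in rank:
--             if char.isdigit():
--                 file_idx += int(char)
--             else: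
--                 file_letter = chr(ord('A') + file_idx)
--                 rank_number = str(8 - rank_idx)
--                 square = f"{file_letter}{rank_number}"
--
--                 state[square] = char
--                 file_idx += 1
--
--     return state
-- ===== SOURCE B (Python) =====
-- def fen_to_board_state(fen: str) -> dict:
--     """
--     Convert FEN to board state (square -> piece type).
--
--     Expands each rank's digits into runs of empty cells first, so the file
--     index is just the position in the expanded rank (no running counter).
--     """
--     board_part = fen.split()[0]
--     state = {}
--     for rank_idx, rank in enumerate(board_part.split('/')):
--         cells = []
--         for char in rank:
--             if char.isdigit():
--                 cells.extend([None] * int(char))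
--             else:
--                 cells.append(char)
--         rank_number = str(8 - rank_idx)
--         for file_idx, piece in enumerate(cells):
--             if piece is not None:
--                 state[chr(ord('A') + file_idx) + rank_number] = piece
--     return state
-- ===== Notes on version B (the rewrite author's own statement) =====
-- stated objective: alternative
-- what changed: B first expands each rank's digits into a dense list of empty cells and then reads the file index positionally via enumerate, instead of A's running file_idx accumulator updated inline while scanning the raw rank.
import Mathlib
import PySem

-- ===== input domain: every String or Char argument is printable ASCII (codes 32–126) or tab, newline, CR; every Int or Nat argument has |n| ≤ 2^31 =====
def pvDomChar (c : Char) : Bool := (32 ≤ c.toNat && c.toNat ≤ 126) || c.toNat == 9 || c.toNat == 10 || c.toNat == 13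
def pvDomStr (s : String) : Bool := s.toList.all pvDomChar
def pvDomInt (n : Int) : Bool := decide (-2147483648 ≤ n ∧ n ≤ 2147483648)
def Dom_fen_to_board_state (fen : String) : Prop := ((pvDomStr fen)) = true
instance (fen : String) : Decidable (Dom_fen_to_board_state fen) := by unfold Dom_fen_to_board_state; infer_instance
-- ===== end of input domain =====

-- B replaces A's running file_idx accumulator by a dense per-rank expansion read positionally with enumerate (objective: alternative decomposition).

-- ===== PORT A =====
-- int(char) is ported as (c.toNat - 48): exact here, since the guard PySem.Chars.isdigit c means '0' ≤ c ≤ '9';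
-- chr(ord('A') + file_idx) is ported as Char.ofNat (65 + file_idx.toNat): file_idx is never negative.
def fenStepA (rankIdx : Int) (st : PySem.Dict String String × Int) (c : Char) :
    PySem.Dict String String × Int :=
  if PySem.Chars.isdigit c then
    (st.1, st.2 + ((c.toNat : Int) - 48))
  else
    let square := String.ofList (Char.ofNat (65 + st.2.toNat) :: PySem.Int.toChars (8 - rankIdx))
    (st.1.insert square (String.ofList [c]), st.2 + 1)

def fen_to_board_state (fen : String) : List (String × String) :=
  match (PySem.Str.split₀ fen)[0]? with
  | none => []  -- fen.split()[0] raises IndexError; excluded by Pre_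
  | some board_part =>
    let ranks := (PySem.Str.split? board_part "/").getD []  -- sep "/" ≠ "": always some
    ((PySem.List.enumerate ranks).foldl
      (fun d p => (p.2.toList.foldl (fenStepA p.1) (d, 0)).1)
      PySem.Dict.empty).items

-- ===== PORT B =====
def fenExpand (rank : List Char) : List (Option Char) :=
  rank.foldl (fun cells c =>
    if PySem.Chars.isdigit c then
      cells ++ List.replicate ((c.toNat : Int) - 48).toNat (none : Option Char)
    else cells ++ [some c]) []

def fenStepB (rankNumber : List Char) (d : PySem.Dict String String) (q : Int × Option Char) :
    PySem.Dict String String :=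
  match q.2 with
  | none => d
  | some piece => d.insert (String.ofList (Char.ofNat (65 + q.1.toNat) :: rankNumber)) (String.ofList [piece])

def fen_to_board_state_alt (fen : String) : List (String × String) :=
  match (PySem.Str.split₀ fen)[0]? with
  | none => []  -- fen.split()[0] raises IndexError; excluded by Pre_
  | some board_part =>
    let ranks := (PySem.Str.split? board_part "/").getD []  -- sep "/" ≠ "": always some
    ((PySem.List.enumerate ranks).foldl
      (fun d p =>
        (PySem.List.enumerate (fenExpand p.2.toList)).foldl
          (fenStepB (PySem.Int.toChars (8 - p.1))) d)
      PySem.Dict.empty).items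

-- ===== PRECONDITION & SPEC =====
-- Pre_ excludes exactly the inputs where fen.split() is empty (fen all whitespace), on which both
-- A and B raise IndexError at fen.split()[0].
def Pre_fen_to_board_state (fen : String) : Prop := PySem.Str.split₀ fen ≠ []
instance (fen : String) : Decidable (Pre_fen_to_board_state fen) := by
  unfold Pre_fen_to_board_state; infer_instance

def pvWitness_fen_to_board_state : String := "rnbqkbnr/pp1p2pp/8/8/4P3/8/PPPP1PPP/RNBQKBNR w KQkq - 0 1"

def Spec_fen_to_board_state (fen : String) (out : List (String × String)) : Prop :=
  out = fen_to_board_state_alt fen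
instance (fen : String) (out : List (String × String)) : Decidable (Spec_fen_to_board_state fen out) := by
  unfold Spec_fen_to_board_state; infer_instance

-- ===== CLAIM (what is proved, stated in full; the proofs are below) =====
def Claim_equal_fen_to_board_state : Prop :=
  ∀ (fen : String), Dom_fen_to_board_state fen → Pre_fen_to_board_state fen →
    Spec_fen_to_board_state fen (fen_to_board_state fen)

-- ===== LEMMAS AND PROOFS =====

-- the cell list a single rank character expands to
def fenCell (c : Char) : List (Option Char) :=
  if PySem.Chars.isdigit c then List.replicate ((c.toNat : Int) - 48).toNat (none : Option Char)
  else [some c]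

lemma fenExpand_eq (l : List Char) : fenExpand l = l.flatMap fenCell := by
  have h : fenExpand l = l.foldl (fun acc c => acc ++ fenCell c) [] := by
    unfold fenExpand fenCell
    congr 1
    funext acc c
    split <;> rfl
  rw [h, PySem.List.foldl_append_eq_flatMap]
  rfl

lemma fenStepB_skip (rn : List Char) :
    ∀ (n : Nat) (s : Int) (d : PySem.Dict String String),
      (PySem.List.enumerate (List.replicate n (none : Option Char)) s).foldl (fenStepB rn) d = d := by
  intro n
  induction n with
  | zero => intro s d; rfl
  | succ k ih =>
    intro s d
    rw [List.replicate_succ, PySem.List.enumerate_cons]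
    simpa [fenStepB] using ih (s + 1) d

lemma fenRank_eq (ri : Int) :
    ∀ (l : List Char) (d : PySem.Dict String String) (fi : Int), 0 ≤ fi →
      (l.foldl (fenStepA ri) (d, fi)).1
        = (PySem.List.enumerate (l.flatMap fenCell) fi).foldl
            (fenStepB (PySem.Int.toChars (8 - ri))) d := by
  intro l
  induction l with
  | nil => intro d fi _; rfl
  | cons c t ih =>
    intro d fi hfi
    by_cases hdig : PySem.Chars.isdigit c = true
    · have h48 : (48 : Nat) ≤ c.toNat := by
        have h0 := hdig
        simp [PySem.Chars.isdigit] at h0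
        exact h0.1
      have hv : (fi + ((c.toNat : Int) - 48).toNat : Int) = fi + ((c.toNat : Int) - 48) := by
        omega
      rw [List.foldl_cons, List.flatMap_cons]
      simp only [fenStepA, hdig, if_pos, fenCell]
      rw [PySem.List.enumerate_append, List.foldl_append, fenStepB_skip,
        List.length_replicate, hv]
      exact ih d (fi + ((c.toNat : Int) - 48)) (by omega)
    · rw [List.foldl_cons, List.flatMap_cons]
      simp only [fenStepA, fenCell, if_neg hdig]
      rw [List.singleton_append, PySem.List.enumerate_cons, List.foldl_cons]
      simp only [fenStepB]
      exact ih _ (fi + 1) (by omega)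

lemma fenInner_eq :
    (fun (d : PySem.Dict String String) (p : Int × String) =>
        (p.2.toList.foldl (fenStepA p.1) (d, 0)).1)
      = (fun d p =>
        (PySem.List.enumerate (fenExpand p.2.toList)).foldl
          (fenStepB (PySem.Int.toChars (8 - p.1))) d) := by
  funext d p
  rw [fenExpand_eq]
  exact fenRank_eq p.1 p.2.toList d 0 le_rfl

-- ===== VERDICT (by name: the statement is the Claim_ definition above) =====
theorem fen_to_board_state_spec : Claim_equal_fen_to_board_state := by
  intro fen _ _
  unfold Spec_fen_to_board_state fen_to_board_state fen_to_board_state_alt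
  cases h : (PySem.Str.split₀ fen)[0]? with
  | none => rfl
  | some bp => rw [fenInner_eq]
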